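-- pv_equiv track=rewrite | github.com/maaarvin-was-here/advent-2024 | d4/d4.py | is_valid_a
-- ===== SOURCE A (Python) =====
-- def is_valid_a(grid, coord):
--     rows, cols = len(grid), len(grid[0])
--     r = coord[0]
--     c = coord[1]
--     directions = [
--             (-1, -1),   # up left
--             (-1, 1),    # up right
--             (1, -1),    # down left
--             (1, 1)      # down right
--         ]
--
--     for dr, dc in directions:
--         if r + dr not in range(0, rows) or \
--             c + dc not in range(0, cols):
--                 return False
--
--     return True
-- ===== SOURCE B (Python) =====
-- def is_valid_a(grid, coord):
--     rows, cols = len(grid), len(grid[0])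
--     r = coord[0]
--     c = coord[1]
--     return 0 < r < rows - 1 and 0 < c < cols - 1
-- ===== Notes on version B (the rewrite author's own statement) =====
-- stated objective: simpler
-- what changed: Replaces the direction list and early-return loop with a single closed-form bound check (all four diagonal neighbors are in bounds exactly when r and c are strictly inside every edge).
import Mathlib
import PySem

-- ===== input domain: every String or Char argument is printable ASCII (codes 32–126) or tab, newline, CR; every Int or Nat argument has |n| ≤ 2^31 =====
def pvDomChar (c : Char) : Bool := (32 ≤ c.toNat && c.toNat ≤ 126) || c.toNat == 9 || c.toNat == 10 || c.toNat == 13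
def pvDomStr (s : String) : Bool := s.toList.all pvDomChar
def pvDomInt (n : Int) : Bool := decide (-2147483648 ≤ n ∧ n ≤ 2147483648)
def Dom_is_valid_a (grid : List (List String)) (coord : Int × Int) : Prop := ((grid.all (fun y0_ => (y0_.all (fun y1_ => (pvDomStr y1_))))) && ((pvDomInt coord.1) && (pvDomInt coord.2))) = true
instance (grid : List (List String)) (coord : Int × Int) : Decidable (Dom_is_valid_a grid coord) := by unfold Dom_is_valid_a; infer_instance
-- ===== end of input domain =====

-- B replaces A's direction list and early-return loop with one closed-form bound check (objective: simpler).


-- ===== PORT A =====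
-- the for-loop over the direction list, with early return False
def is_valid_a_loop (rows cols r c : Int) : List (Int × Int) → Bool
  | [] => true
  | (dr, dc) :: rest =>
      if ¬(0 ≤ r + dr ∧ r + dr < rows) ∨ ¬(0 ≤ c + dc ∧ c + dc < cols) then false
      else is_valid_a_loop rows cols r c rest

def is_valid_a (grid : List (List String)) (coord : Int × Int) : Bool :=
  let rows : Int := grid.length
  let cols : Int := (grid.headD []).length   -- grid[0]; Pre_ excludes the empty grid where Python raises IndexError
  let r := coord.1
  let c := coord.2
  is_valid_a_loop rows cols r c [(-1, -1), (-1, 1), (1, -1), (1, 1)]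

-- ===== PORT B =====
def is_valid_a_alt (grid : List (List String)) (coord : Int × Int) : Bool :=
  let rows : Int := grid.length
  let cols : Int := (grid.headD []).length   -- grid[0]; Pre_ excludes the empty grid where Python raises IndexError
  let r := coord.1
  let c := coord.2
  decide (0 < r ∧ r < rows - 1 ∧ 0 < c ∧ c < cols - 1)

-- ===== PRECONDITION & SPEC =====
-- Pre_ excludes only the empty grid, on which both A and B raise IndexError at grid[0].
def Pre_is_valid_a (grid : List (List String)) (coord : Int × Int) : Prop := grid ≠ []
instance (grid : List (List String)) (coord : Int × Int) : Decidable (Pre_is_valid_a grid coord) := by unfold Pre_is_valid_a; infer_instance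
def pvWitness_is_valid_a : List (List String) × (Int × Int) := ([["a","b"],["c","d"]], (1, 1))

def Spec_is_valid_a (grid : List (List String)) (coord : Int × Int) (out : Bool) : Prop := out = is_valid_a_alt grid coord
instance (grid : List (List String)) (coord : Int × Int) (out : Bool) : Decidable (Spec_is_valid_a grid coord out) := by unfold Spec_is_valid_a; infer_instance

-- ===== CLAIM (what is proved, stated in full; the proofs are below) =====
def Claim_equal_is_valid_a : Prop := ∀ (grid : List (List String)) (coord : Int × Int), Dom_is_valid_a grid coord → Pre_is_valid_a grid coord → Spec_is_valid_a grid coord (is_valid_a grid coord)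

-- ===== LEMMAS AND PROOFS =====

-- ===== VERDICT (by name: the statement is the Claim_ definition above) =====
theorem is_valid_a_spec : Claim_equal_is_valid_a := by
  intro grid coord _ _
  unfold Spec_is_valid_a is_valid_a is_valid_a_alt
  simp only [is_valid_a_loop]
  split_ifs <;> simp_all [List.headD_eq_head?_getD] <;> omega
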